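-- pv_equiv track=rewrite | github.com/raki-1203/boostcamp_note | Coding_Solve/20210906/괄호변환[2020 KAKAO BLIND RECRUITMENT].py | solution
-- ===== SOURCE A (Python) =====
-- def divide(w):
--     left_cnt = 0
--     right_cnt = 0
--     for i in range(len(w)):
--         if w[i] == '(':
--             left_cnt += 1
--         elif w[i] == ')':
--             right_cnt += 1
--         if left_cnt == right_cnt:
--             return w[:i + 1], w[i + 1:]
--
-- def is_correct(u):
--     if u[0] == ')':
--         return False
--     else:
--         left_cnt = 0
--         right_cnt = 0
--         for i in range(len(u)):
--             if u[i] == '(':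
--                 left_cnt += 1
--             else:
--                 right_cnt += 1
--             if left_cnt < right_cnt:
--                 return False
--         return True
--
-- def solution(p):
--     if p == '':
--         return ''
--
--     u, v = divide(p)
--     if is_correct(u):
--         answer = u
--         answer += solution(v)
--     else:
--         answer = '('
--         answer += solution(v)
--         answer += ')'
--         u = u[1:-1]
--         answer += ''.join(['(' if x == ')' else ')' for x in u])
--
--     return answer
-- ===== SOURCE B (Python) =====
-- def solution(p):
--     # One pass: split p into minimal zero-balance units while tracking each unit's
--     # "correct" flag, emitting output pieces into a front list and a back list
--     # (the wrap suffixes, joined in reverse at the end) -- no recursion, no re-scans.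
--     front = []
--     back = []
--     cur = []
--     bal = 0
--     b2 = 0
--     ok = True
--     for ch in p:
--         cur.append(ch)
--         if ch == '(':
--             bal += 1
--             b2 += 1
--         else:
--             if ch == ')':
--                 bal -= 1
--             b2 -= 1
--         if b2 < 0:
--             ok = False
--         if bal == 0:
--             if ok:
--                 front.append(''.join(cur))
--             else:
--                 front.append('(')
--                 back.append(')' + ''.join('(' if x == ')' else ')' for x in cur[1:-1]))
--             cur = []
--             b2 = 0
--             ok = True
--     return ''.join(front) + ''.join(reversed(back))
-- ===== Notes on version B (the rewrite author's own statement) =====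
-- stated objective: faster
-- what changed: A recursively re-slices the string, rescanning each remainder (divide + is_correct passes plus recursion); B makes a single left-to-right pass that cuts minimal zero-balance units while tracking their correctness flag, emitting output pieces into a front list and a back list joined once at the end.
-- outside the precondition, e.g. on solution('('): A raises TypeError, B returns ''; on solution(')'): A raises TypeError, B returns ''
import Mathlib
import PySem

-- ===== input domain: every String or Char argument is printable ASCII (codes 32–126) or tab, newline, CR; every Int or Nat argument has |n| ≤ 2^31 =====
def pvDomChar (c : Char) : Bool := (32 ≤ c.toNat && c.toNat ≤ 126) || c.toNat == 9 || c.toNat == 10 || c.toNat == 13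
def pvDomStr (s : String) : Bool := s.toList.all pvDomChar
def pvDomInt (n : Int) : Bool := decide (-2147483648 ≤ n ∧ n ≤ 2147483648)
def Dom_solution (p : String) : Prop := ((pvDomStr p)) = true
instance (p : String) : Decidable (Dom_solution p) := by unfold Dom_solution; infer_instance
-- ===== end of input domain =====

-- B replaces A's recursive divide/re-scan scheme (repeated slicing and rescanning) by one
-- left-to-right pass that cuts minimal zero-balance units and assembles the answer from a
-- front list and a reversed back list; equivalence is proved on inputs with equally many
-- '(' and ')' (A raises TypeError elsewhere).

-- ===== PORT A =====
-- loop of Python divide(w); l = left_cnt, r = right_cnt; fuel = number of remaining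
-- indices (w.length at the top call) only makes the index loop structural
def divLoopA (w : List Char) (fuel i l r : Nat) : Option (List Char × List Char) :=
  match fuel with
  | 0 => none
  | fuel + 1 =>
    if h : i < w.length then
      let l' := if w[i] = '(' then l + 1 else l
      let r' := if w[i] ≠ '(' ∧ w[i] = ')' then r + 1 else r
      if l' = r' then some (w.take (i + 1), w.drop (i + 1)) else divLoopA w fuel (i + 1) l' r'
    else none

def divideA (w : List Char) : Option (List Char × List Char) := divLoopA w w.length 0 0 0

-- loop of Python is_correct(u); fuel as above
def icLoopA (u : List Char) (fuel i l r : Nat) : Bool :=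
  match fuel with
  | 0 => true
  | fuel + 1 =>
    if h : i < u.length then
      let l' := if u[i] = '(' then l + 1 else l
      let r' := if u[i] = '(' then r else r + 1
      if l' < r' then false else icLoopA u fuel (i + 1) l' r'
    else true

def isCorrectA (u : List Char) : Bool :=
  match u with
  | [] => false   -- Python u[0] raises IndexError on empty u; unreachable from solution
  | c :: _ => if c = ')' then false else icLoopA u u.length 0 0 0

-- ''.join(['(' if x == ')' else ')' for x in u]) applied to u[1:-1]
def flipA (u : List Char) : List Char :=
  (PySem.List.slice u (some 1) (some (-1))).map (fun x => if x = ')' then '(' else ')')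

-- Python's recursion on the strictly shorter v, made structural by a fuel bounded by the
-- string length (each recursive call strips a nonempty prefix, so p.length fuel suffices)
def solutionAF (fuel : Nat) (p : List Char) : List Char :=
  match fuel with
  | 0 => []   -- fuel guard only; never reached from solution
  | fuel + 1 =>
    if p = [] then []
    else
      match divideA p with
      | none => []   -- Python raises TypeError here (unpacking None); excluded by Pre_solution
      | some (u, v) =>
        if isCorrectA u then u ++ solutionAF fuel v
        else '(' :: solutionAF fuel v ++ ')' :: flipA u

def solution (p : String) : String := String.ofList (solutionAF p.toList.length p.toList)

-- ===== PORT B =====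
def flipB (u : List Char) : List Char :=
  (PySem.List.slice u (some 1) (some (-1))).map (fun x => if x = ')' then '(' else ')')

-- the single for-loop of Source B; at the end Source B returns ''.join(front) + ''.join(reversed(back))
def scanB (rest cur : List Char) (bal b2 : Int) (ok : Bool)
    (front back : List (List Char)) : List Char :=
  match rest with
  | [] => front.flatten ++ back.reverse.flatten
  | ch :: rest' =>
    let cur' := cur ++ [ch]
    let bal' := if ch = '(' then bal + 1 else if ch = ')' then bal - 1 else bal
    let b2' := if ch = '(' then b2 + 1 else b2 - 1
    let ok' := if b2' < 0 then false else ok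
    if bal' = 0 then
      if ok' then scanB rest' [] 0 0 true (front ++ [cur']) back
      else scanB rest' [] 0 0 true (front ++ [['(']]) (back ++ [')' :: flipB cur'])
    else scanB rest' cur' bal' b2' ok' front back

def solution_alt (p : String) : String := String.ofList (scanB p.toList [] 0 0 true [] [])

-- ===== PRECONDITION & SPEC =====
-- On strings with unequal counts of '(' and ')' Python's divide eventually returns None and
-- solution raises TypeError unpacking it; exactly those inputs are excluded.
def Pre_solution (p : String) : Prop := p.toList.count '(' = p.toList.count ')'
instance (p : String) : Decidable (Pre_solution p) := by unfold Pre_solution; infer_instance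

def pvWitness_solution : String := "()"

def Spec_solution (p : String) (out : String) : Prop := out = solution_alt p
instance (p : String) (out : String) : Decidable (Spec_solution p out) := by unfold Spec_solution; infer_instance

-- ===== CLAIM (what is proved, stated in full; the proofs are below) =====
def Claim_equal_solution : Prop := ∀ (p : String), Dom_solution p → Pre_solution p → Spec_solution p (solution p)
-- ===== LEMMAS AND PROOFS =====

-- paren balance of a word: '(' counts +1, ')' counts -1, others 0
def pbal (xs : List Char) : Int :=
  xs.foldl (fun b c => if c = '(' then b + 1 else if c = ')' then b - 1 else b) 0

-- the (ok, b2) state Source B maintains inside one unit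
def stB (xs : List Char) : Bool × Int :=
  xs.foldl (fun s c =>
    let b := if c = '(' then s.2 + 1 else s.2 - 1
    (if b < 0 then false else s.1, b)) (true, 0)

-- forward version of is_correct's scan
def okFwd : List Char → Int → Bool
  | [], _ => true
  | c :: cs, b =>
    let b' := if c = '(' then b + 1 else b - 1
    if b' < 0 then false else okFwd cs b'

theorem pbal_foldl (xs : List Char) : ∀ b : Int,
    xs.foldl (fun b c => if c = '(' then b + 1 else if c = ')' then b - 1 else b) b
      = b + pbal xs := by
  induction xs with
  | nil => intro b; simp [pbal]
  | cons c cs ih =>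
    intro b
    simp only [pbal, List.foldl_cons]
    rw [ih, ih]
    split_ifs <;> omega

theorem pbal_append (xs ys : List Char) : pbal (xs ++ ys) = pbal xs + pbal ys := by
  simp only [pbal, List.foldl_append]
  rw [pbal_foldl]
  rfl

theorem pbal_concat (xs : List Char) (c : Char) :
    pbal (xs ++ [c]) = pbal xs + (if c = '(' then 1 else if c = ')' then -1 else 0) := by
  rw [pbal_append]
  have h1 : pbal [c] = (if c = '(' then (1 : Int) else if c = ')' then -1 else 0) := by
    simp only [pbal, List.foldl_cons, List.foldl_nil]
    split_ifs <;> omega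
  rw [h1]

theorem stB_append (xs : List Char) (c : Char) :
    stB (xs ++ [c]) =
      (if (if c = '(' then (stB xs).2 + 1 else (stB xs).2 - 1) < 0 then false else (stB xs).1,
       if c = '(' then (stB xs).2 + 1 else (stB xs).2 - 1) := by
  simp [stB, List.foldl_append]

theorem stB_fst (xs : List Char) : ∀ (ok : Bool) (b : Int),
    (xs.foldl (fun s c =>
      let b := if c = '(' then s.2 + 1 else s.2 - 1
      (if b < 0 then false else s.1, b)) (ok, b)).1 = (ok && okFwd xs b) := by
  induction xs with
  | nil => intro ok b; simp [okFwd]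
  | cons c cs ih =>
    intro ok b
    simp only [List.foldl_cons, okFwd]
    by_cases h : (if c = '(' then b + 1 else b - 1) < 0
    · simp only [if_pos h]
      rw [ih]
      simp
    · simp only [if_neg h]
      rw [ih]

theorem icLoopA_eq_okFwd (u : List Char) : ∀ (k i l r : Nat),
    u.length - i = k →
    icLoopA u k i l r = okFwd (u.drop i) ((l : Int) - r) := by
  intro k
  induction k with
  | zero =>
    intro i l r hk
    rw [icLoopA, List.drop_eq_nil_of_le (by omega : u.length ≤ i)]
    rfl
  | succ k ih =>
    intro i l r hk
    have hi : i < u.length := by omega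
    rw [icLoopA, List.drop_eq_getElem_cons hi]
    simp only [hi, dif_pos, okFwd]
    by_cases hc : u[i] = '('
    · simp only [if_pos hc]
      by_cases hlt : l + 1 < r
      · have hneg : (l : Int) - r + 1 < 0 := by omega
        rw [if_pos hlt, if_pos hneg]
      · have hneg : ¬ ((l : Int) - r + 1 < 0) := by omega
        rw [if_neg hlt, if_neg hneg, ih (i + 1) (l + 1) r (by omega)]
        congr 1
        push_cast
        ring
    · simp only [if_neg hc]
      by_cases hlt : l < r + 1
      · have hneg : (l : Int) - r - 1 < 0 := by omega
        rw [if_pos hlt, if_pos hneg]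
      · have hneg : ¬ ((l : Int) - r - 1 < 0) := by omega
        rw [if_neg hlt, if_neg hneg, ih (i + 1) l (r + 1) (by omega)]
        congr 1
        push_cast
        ring

theorem isCorrectA_eq_stB (u : List Char) (hu : u ≠ []) : isCorrectA u = (stB u).1 := by
  have hfst : (stB u).1 = okFwd u 0 := by
    have := stB_fst u true 0
    simpa [stB] using this
  obtain ⟨c, cs, rfl⟩ := List.exists_cons_of_ne_nil hu
  rw [hfst]
  show (if c = ')' then false else icLoopA (c :: cs) (c :: cs).length 0 0 0) = okFwd (c :: cs) 0
  by_cases hc : c = ')'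
  · subst hc
    simp [okFwd]
  · rw [if_neg hc]
    have := icLoopA_eq_okFwd (c :: cs) (c :: cs).length 0 0 0 (by simp)
    simpa using this

theorem divLoopA_isSome (w : List Char) : ∀ (k i l r : Nat),
    w.length - i = k → i < w.length → (l : Int) - r + pbal (w.drop i) = 0 →
    (divLoopA w k i l r).isSome := by
  intro k
  induction k with
  | zero => intro i l r hk hi _; omega
  | succ k ih =>
    intro i l r hk hi hb
    rw [divLoopA, dif_pos hi]
    simp only
    rw [List.drop_eq_getElem_cons hi] at hb
    have hsplit : pbal (w[i] :: w.drop (i + 1)) =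
        (if w[i] = '(' then (1 : Int) else if w[i] = ')' then -1 else 0) + pbal (w.drop (i + 1)) := by
      simp only [pbal, List.foldl_cons]
      rw [pbal_foldl]
      split_ifs <;> simp [pbal]
    rw [hsplit] at hb
    have htail : ¬ (i + 1 < w.length) → pbal (w.drop (i + 1)) = 0 := by
      intro hge
      rw [List.drop_eq_nil_of_le (by omega)]
      simp [pbal]
    by_cases h1 : w[i] = '('
    · have hne : ¬ (w[i] ≠ '(' ∧ w[i] = ')') := by simp [h1]
      simp only [if_pos h1, if_neg hne]
      rw [if_pos h1] at hb
      by_cases heq : l + 1 = r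
      · simp [heq]
      · rw [if_neg heq]
        refine ih (i + 1) (l + 1) r (by omega) ?_ (by push_cast; omega)
        by_contra hge
        have := htail hge
        omega
    · by_cases h2 : w[i] = ')'
      · have hyes : w[i] ≠ '(' ∧ w[i] = ')' := ⟨h1, h2⟩
        simp only [if_neg h1, if_pos hyes]
        rw [if_neg h1, if_pos h2] at hb
        by_cases heq : l = r + 1
        · simp [heq]
        · rw [if_neg heq]
          refine ih (i + 1) l (r + 1) (by omega) ?_ (by push_cast; omega)
          by_contra hge
          have := htail hge
          omega
      · have hno : ¬ (w[i] ≠ '(' ∧ w[i] = ')') := by simp [h2]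
        simp only [if_neg h1, if_neg hno]
        rw [if_neg h1, if_neg h2] at hb
        by_cases heq : l = r
        · simp [heq]
        · rw [if_neg heq]
          refine ih (i + 1) l r (by omega) ?_ (by omega)
          by_contra hge
          have := htail hge
          omega

theorem divLoopA_spec (w : List Char) : ∀ (k i l r : Nat) (u v : List Char),
    w.length - i = k → ((l : Int) - r = pbal (w.take i)) →
    divLoopA w k i l r = some (u, v) →
    ∃ j, i ≤ j ∧ j < w.length ∧ u = w.take (j + 1) ∧ v = w.drop (j + 1) ∧ pbal u = 0 := by
  intro k
  induction k with
  | zero =>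
    intro i l r u v hk hb h
    rw [divLoopA] at h
    exact absurd h (by simp)
  | succ k ih =>
    intro i l r u v hk hb h
    have hi : i < w.length := by omega
    rw [divLoopA, dif_pos hi] at h
    simp only at h
    have htake : w.take (i + 1) = w.take i ++ [w[i]] := by
      rw [List.take_succ, List.getElem?_eq_getElem hi]
      simp
    have hstep : ((if w[i] = '(' then l + 1 else l : Nat) : Int)
        - (if w[i] ≠ '(' ∧ w[i] = ')' then r + 1 else r : Nat) = pbal (w.take (i + 1)) := by
      rw [htake, pbal_concat, ← hb]
      by_cases h1 : w[i] = '('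
      · have hne : ¬ (w[i] ≠ '(' ∧ w[i] = ')') := by simp [h1]
        rw [if_pos h1, if_neg hne, if_pos h1]
        push_cast
        ring
      · by_cases h2 : w[i] = ')'
        · have hyes : w[i] ≠ '(' ∧ w[i] = ')' := ⟨h1, h2⟩
          rw [if_neg h1, if_pos hyes, if_neg h1, if_pos h2]
          push_cast
          ring
        · have hno : ¬ (w[i] ≠ '(' ∧ w[i] = ')') := by simp [h2]
          rw [if_neg h1, if_neg hno, if_neg h1, if_neg h2]
          push_cast
          ring
    by_cases heq : (if w[i] = '(' then l + 1 else l) = (if w[i] ≠ '(' ∧ w[i] = ')' then r + 1 else r)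
    · rw [if_pos heq] at h
      simp only [Option.some.injEq, Prod.mk.injEq] at h
      refine ⟨i, le_refl i, hi, h.1.symm, h.2.symm, ?_⟩
      rw [h.1.symm, ← hstep]
      have : ((if w[i] = '(' then l + 1 else l : Nat) : Int)
          = ((if w[i] ≠ '(' ∧ w[i] = ')' then r + 1 else r : Nat) : Int) := congrArg _ heq
      omega
    · rw [if_neg heq] at h
      obtain ⟨j, hj1, hj2, hj3, hj4, hj5⟩ := ih (i + 1) _ _ u v (by omega) hstep h
      exact ⟨j, by omega, hj2, hj3, hj4, hj5⟩

-- front/back only accumulate: factor them out of scanB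
theorem scanB_frames : ∀ (rest cur : List Char) (bal b2 : Int) (ok : Bool)
    (front back : List (List Char)),
    scanB rest cur bal b2 ok front back
      = front.flatten ++ scanB rest cur bal b2 ok [] [] ++ back.reverse.flatten := by
  intro rest
  induction rest with
  | nil =>
    intro cur bal b2 ok front back
    rw [scanB]
    conv_rhs => rw [scanB]
    simp
  | cons ch rest' ih =>
    intro cur bal b2 ok front back
    rw [scanB]
    conv_rhs => rw [scanB]
    by_cases hbal : (if ch = '(' then bal + 1 else if ch = ')' then bal - 1 else bal) = 0
    · simp only [if_pos hbal]
      by_cases hok : (if (if ch = '(' then b2 + 1 else b2 - 1) < 0 then false else ok) = true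
      · simp only [if_pos hok]
        rw [ih _ _ _ _ (front ++ [cur ++ [ch]]) back,
          ih _ _ _ _ ([] ++ [cur ++ [ch]]) ([] : List (List Char))]
        simp
      · simp only [if_neg hok]
        rw [ih _ _ _ _ (front ++ [['(']]) (back ++ [')' :: flipB (cur ++ [ch])]),
          ih _ _ _ _ ([] ++ [['(']]) ([] ++ [')' :: flipB (cur ++ [ch])])]
        simp
    · simp only [if_neg hbal]
      exact ih _ _ _ _ front back

theorem lockstep (w : List Char) : ∀ (k i l r : Nat) (front back : List (List Char)),
    w.length - i = k → i ≤ w.length →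
    scanB (w.drop i) (w.take i) ((l : Int) - r) (stB (w.take i)).2 (stB (w.take i)).1 front back
      = (match divLoopA w k i l r with
        | none => front.flatten ++ back.reverse.flatten
        | some (u, v) =>
          if (stB u).1 then scanB v [] 0 0 true (front ++ [u]) back
          else scanB v [] 0 0 true (front ++ [['(']]) (back ++ [')' :: flipB u])) := by
  intro k
  induction k with
  | zero =>
    intro i l r front back hk hi
    rw [divLoopA, List.drop_eq_nil_of_le (by omega : w.length ≤ i)]
    rfl
  | succ k ih =>
    intro i l r front back hk hile
    have hi : i < w.length := by omega
    have htake : w.take i ++ [w[i]] = w.take (i + 1) := by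
      rw [List.take_succ, List.getElem?_eq_getElem hi]
      simp
    have hpair : stB (w.take (i + 1)) =
        (if (if w[i] = '(' then (stB (w.take i)).2 + 1 else (stB (w.take i)).2 - 1) < 0 then false
           else (stB (w.take i)).1,
         if w[i] = '(' then (stB (w.take i)).2 + 1 else (stB (w.take i)).2 - 1) := by
      rw [← htake]
      exact stB_append _ _
    have hb2 : (stB (w.take (i + 1))).2
        = (if w[i] = '(' then (stB (w.take i)).2 + 1 else (stB (w.take i)).2 - 1) := by rw [hpair]
    have hok : (stB (w.take (i + 1))).1
        = (if (stB (w.take (i + 1))).2 < 0 then false else (stB (w.take i)).1) := by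
      rw [hb2, hpair]
    rw [List.drop_eq_getElem_cons hi]
    conv_lhs => rw [scanB]
    rw [divLoopA, dif_pos hi]
    rw [← hb2, ← hok, htake]
    by_cases h1 : w[i] = '('
    · have hne : ¬ (w[i] ≠ '(' ∧ w[i] = ')') := by simp [h1]
      simp only [if_pos h1, if_neg hne]
      by_cases heq : l + 1 = r
      · have hbal : (l : Int) - r + 1 = 0 := by omega
        simp only [if_pos hbal, if_pos heq]
      · have hbal : ¬ ((l : Int) - r + 1 = 0) := by omega
        simp only [if_neg hbal, if_neg heq]
        have hrec := ih (i + 1) (l + 1) r front back (by omega) (by omega)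
        have hcast : ((l + 1 : Nat) : Int) - r = (l : Int) - r + 1 := by push_cast; ring
        rw [hcast] at hrec
        exact hrec
    · by_cases h2 : w[i] = ')'
      · have hyes : w[i] ≠ '(' ∧ w[i] = ')' := ⟨h1, h2⟩
        simp only [if_neg h1, if_pos h2, if_pos hyes]
        by_cases heq : l = r + 1
        · have hbal : (l : Int) - r - 1 = 0 := by omega
          simp only [if_pos hbal, if_pos heq]
        · have hbal : ¬ ((l : Int) - r - 1 = 0) := by omega
          simp only [if_neg hbal, if_neg heq]
          have hrec := ih (i + 1) l (r + 1) front back (by omega) (by omega)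
          have hcast : (l : Int) - ((r + 1 : Nat) : Int) = (l : Int) - r - 1 := by push_cast; ring
          rw [hcast] at hrec
          exact hrec
      · have hno : ¬ (w[i] ≠ '(' ∧ w[i] = ')') := by simp [h2]
        simp only [if_neg h1, if_neg h2, if_neg hno]
        by_cases heq : l = r
        · have hbal : (l : Int) - r = 0 := by omega
          simp only [if_pos hbal, if_pos heq]
        · have hbal : ¬ ((l : Int) - r = 0) := by omega
          simp only [if_neg hbal, if_neg heq]
          exact ih (i + 1) l r front back (by omega) (by omega)

theorem solutionAF_eq (f : Nat) (p : List Char) (hp : p ≠ []) (u v : List Char)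
    (h : divideA p = some (u, v)) :
    solutionAF (f + 1) p = (if isCorrectA u then u ++ solutionAF f v
                            else '(' :: solutionAF f v ++ ')' :: flipA u) := by
  rw [solutionAF, if_neg hp]
  split
  · next h' => rw [h'] at h; exact absurd h (by simp)
  · next u' v' h' =>
    rw [h'] at h
    simp only [Option.some.injEq, Prod.mk.injEq] at h
    rw [h.1, h.2]

theorem main_core : ∀ (f : Nat) (p : List Char), p.length ≤ f → pbal p = 0 →
    solutionAF f p = scanB p [] 0 0 true [] [] := by
  intro f
  induction f with
  | zero =>
    intro p hf _
    have hp : p = [] := List.eq_nil_of_length_eq_zero (by omega)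
    subst hp
    rw [solutionAF, scanB]
    simp
  | succ f ih =>
    intro p hf hb
    by_cases hp : p = []
    · subst hp
      rw [solutionAF, scanB]
      simp
    · have hlen : 0 < p.length := List.length_pos_of_ne_nil hp
      have hsome : (divLoopA p p.length 0 0 0).isSome := by
        apply divLoopA_isSome p p.length 0 0 0 (by omega) hlen
        simpa using hb
      obtain ⟨⟨u, v⟩, h⟩ := Option.isSome_iff_exists.mp hsome
      obtain ⟨j, _, hj2, hju, hjv, hbu⟩ :=
        divLoopA_spec p p.length 0 0 0 u v (by omega) (by simp [pbal]) h
      have hbv : pbal v = 0 := by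
        have := List.take_append_drop (j + 1) p
        rw [← this, pbal_append, ← hju, ← hjv] at hb
        omega
      have hvlen : v.length ≤ f := by
        rw [hjv]
        simp only [List.length_drop]
        omega
      have hune : u ≠ [] := by
        rw [hju]
        simp [List.take_eq_nil_iff, hp]
      have hIH := ih v hvlen hbv
      have hdiv : divideA p = some (u, v) := h
      -- B side
      have hB : scanB p [] 0 0 true [] [] =
          (if (stB u).1 then scanB v [] 0 0 true [u] []
           else scanB v [] 0 0 true [['(']] [')' :: flipB u]) := by
        have hls := lockstep p p.length 0 0 0 [] [] (by omega) (by omega)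
        simp only [List.drop_zero, List.take_zero, Nat.cast_zero, sub_zero] at hls
        rw [show stB [] = (true, 0) from rfl] at hls
        rw [h] at hls
        simpa using hls
      -- A side
      rw [solutionAF_eq f p hp u v hdiv, hB, isCorrectA_eq_stB u hune]
      by_cases hok : (stB u).1 = true
      · rw [if_pos hok, if_pos hok]
        rw [scanB_frames v [] 0 0 true [u] []]
        rw [← hIH]
        simp
      · rw [if_neg hok, if_neg hok]
        rw [scanB_frames v [] 0 0 true [['(']] [')' :: flipB u]]
        rw [← hIH]
        have hflip : flipA u = flipB u := rfl
        rw [hflip]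
        simp

theorem pbal_eq_count (xs : List Char) :
    pbal xs = (xs.count '(' : Int) - (xs.count ')' : Int) := by
  induction xs with
  | nil => simp [pbal]
  | cons c cs ih =>
    have : pbal (c :: cs) =
        (if c = '(' then (1:Int) else if c = ')' then -1 else 0) + pbal cs := by
      simp only [pbal, List.foldl_cons]
      rw [pbal_foldl]
      split_ifs <;> simp [pbal]
    rw [this, ih]
    by_cases h1 : c = '('
    · simp [h1, List.count_cons]
      push_cast
      omega
    · by_cases h2 : c = ')'
      · simp [h1, h2, List.count_cons]
        push_cast
        omega
      · simp [h1, h2, List.count_cons]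

-- ===== VERDICT (by name: the statement is the Claim_ definition above) =====
theorem solution_spec : Claim_equal_solution := by
  intro p _ hpre
  unfold Spec_solution solution solution_alt
  congr 1
  apply main_core p.toList.length p.toList (le_refl _)
  rw [pbal_eq_count]
  unfold Pre_solution at hpre
  omega
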